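-- pv_equiv track=rewrite | github.com/Ramzy22/serverside_pivot | dash_tanstack_pivot/pivot_engine/pivot_engine/tanstack_adapter.py | _get_center_col_ids_from_rows
-- ===== SOURCE A (Python) =====
-- def _get_center_col_ids_from_rows(rows: list, row_meta_keys: set, pinned_ids: set) -> list:
--     """Return an ordered list of center (non-pinned, non-meta) column IDs from result rows."""
--     seen = []
--     seen_set = set()
--     for row in rows:
--         for col_id in row:
--             if col_id not in seen_set and col_id not in row_meta_keys and col_id not in pinned_ids:
--                 seen.append(col_id)
--                 seen_set.add(col_id)
--     return seen
-- ===== SOURCE B (Python) =====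
-- def _get_center_col_ids_from_rows(rows: list, row_meta_keys: set, pinned_ids: set) -> list:
--     """Return an ordered list of center (non-pinned, non-meta) column IDs from result rows."""
--     flat = [col_id for row in rows for col_id in row]
--     first = {}
--     for i, c in reversed(list(enumerate(flat))):
--         first[c] = i  # earliest index wins: later (smaller-i) inserts overwrite
--     center = {c for c in flat if c not in row_meta_keys and c not in pinned_ids}
--     # first-occurrence index is injective on center, so the sort order is deterministic
--     return sorted(center, key=first.__getitem__)
-- ===== Notes on version B (the rewrite author's own statement) =====
-- stated objective: alternative
-- what changed: Instead of A's fused single pass that maintains a seen-list/seen-set and appends in traversal order, B flattens the keys, builds a first-occurrence index map, selects the center IDs as an unordered set comprehension, and recovers first-occurrence order afterwards by sorting the set on that index.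
import Mathlib
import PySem

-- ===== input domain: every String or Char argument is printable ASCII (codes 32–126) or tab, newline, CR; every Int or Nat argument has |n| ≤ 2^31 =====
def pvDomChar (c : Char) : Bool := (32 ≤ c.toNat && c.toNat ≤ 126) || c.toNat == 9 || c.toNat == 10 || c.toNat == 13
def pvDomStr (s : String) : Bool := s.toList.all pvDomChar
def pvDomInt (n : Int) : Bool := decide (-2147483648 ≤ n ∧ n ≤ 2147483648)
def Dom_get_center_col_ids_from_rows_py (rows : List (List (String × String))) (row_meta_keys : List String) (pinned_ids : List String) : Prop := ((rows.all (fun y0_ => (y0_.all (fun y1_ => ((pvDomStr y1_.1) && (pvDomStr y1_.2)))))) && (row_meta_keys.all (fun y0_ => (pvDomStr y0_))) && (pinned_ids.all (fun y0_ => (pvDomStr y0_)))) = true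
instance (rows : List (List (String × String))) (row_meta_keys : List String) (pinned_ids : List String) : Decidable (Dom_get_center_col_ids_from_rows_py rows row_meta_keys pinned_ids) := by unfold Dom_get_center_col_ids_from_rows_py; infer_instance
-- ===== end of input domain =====

-- B replaces A's fused single pass (parallel seen list + seen set maintained while traversing)
-- by a selection/sort algorithm: build a first-occurrence index map, select the center ids as an
-- unordered set, then recover the order by sorting on that index (objective: alternative, same result).

-- ===== PORT A =====
-- loop body of A's fused loop: append col_id when not yet seen and not meta/pinned
def pvStepA (row_meta_keys pinned_ids : List String) (st : List String × PySem.Set String) (col_id : String) : List String × PySem.Set String :=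
  if !(PySem.Set.contains st.2 col_id) && !(row_meta_keys.contains col_id) && !(pinned_ids.contains col_id) then
    (st.1 ++ [col_id], PySem.Set.add st.2 col_id)
  else st

def get_center_col_ids_from_rows_py (rows : List (List (String × String))) (row_meta_keys : List String) (pinned_ids : List String) : List String :=
  (rows.foldl (fun st row => row.foldl (fun st kv => pvStepA row_meta_keys pinned_ids st kv.1) st)
    (([], PySem.Set.empty) : List String × PySem.Set String)).1

-- ===== PORT B =====
-- flat = [col_id for row in rows for col_id in row]
def pvFlat (rows : List (List (String × String))) : List String :=
  rows.flatMap (fun row => row.map Prod.fst)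

-- first = {}; for i, c in reversed(list(enumerate(flat))): first[c] = i
def pvFirst (flat : List String) : PySem.Dict String Int :=
  (PySem.List.enumerate flat 0).reverse.foldl (fun d p => d.insert p.2 p.1) PySem.Dict.empty

-- center = set comprehension of the non-meta non-pinned ids; result = sorted(center,
-- key=first.__getitem__). Every element of center occurs in flat = the keys of first, so
-- __getitem__ never raises; it is ported as get? with an unreachable default '.getD 0'.
def get_center_col_ids_from_rows_py_alt (rows : List (List (String × String))) (row_meta_keys : List String) (pinned_ids : List String) : List String :=
  PySem.List.sorted
    (PySem.Set.ofList ((pvFlat rows).filter (fun c => !(row_meta_keys.contains c) && !(pinned_ids.contains c))))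
    (fun c => ((pvFirst (pvFlat rows)).get? c).getD 0) false

-- ===== PRECONDITION & SPEC =====
def Spec_get_center_col_ids_from_rows_py (rows : List (List (String × String))) (row_meta_keys : List String) (pinned_ids : List String) (out : List String) : Prop := out = get_center_col_ids_from_rows_py_alt rows row_meta_keys pinned_ids
instance (rows : List (List (String × String))) (row_meta_keys : List String) (pinned_ids : List String) (out : List String) : Decidable (Spec_get_center_col_ids_from_rows_py rows row_meta_keys pinned_ids out) := by unfold Spec_get_center_col_ids_from_rows_py; infer_instance

-- ===== CLAIM (what is proved, stated in full; the proofs are below) =====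
def Claim_equal_get_center_col_ids_from_rows_py : Prop := ∀ (rows : List (List (String × String))) (row_meta_keys : List String) (pinned_ids : List String), Dom_get_center_col_ids_from_rows_py rows row_meta_keys pinned_ids → Spec_get_center_col_ids_from_rows_py rows row_meta_keys pinned_ids (get_center_col_ids_from_rows_py rows row_meta_keys pinned_ids)

-- ===== LEMMAS AND PROOFS =====

-- A's step on a single key, with the state collapsed to the seen list alone
def pvStepS (rmk pin : List String) (s : List String) (c : String) : List String :=
  if !(s.contains c) && !(rmk.contains c) && !(pin.contains c) then s ++ [c] else s

-- A's nested loop over rows is a fold of pvStepA over the flattened key sequence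
lemma pvFlattenA (rmk pin : List String) (rows : List (List (String × String))) (st : List String × PySem.Set String) :
    rows.foldl (fun st row => row.foldl (fun st kv => pvStepA rmk pin st kv.1) st) st
      = (rows.flatMap (fun row => row.map Prod.fst)).foldl (pvStepA rmk pin) st := by
  rw [List.flatMap_def, List.foldl_flatten, List.foldl_map]
  congr 1
  funext st row
  rw [List.foldl_map]

-- the two components of A's state stay equal, so the loop collapses to pvStepS
lemma pvPairEq (rmk pin : List String) : ∀ (keys : List String) (s : List String),
    keys.foldl (pvStepA rmk pin) (s, s)
      = (keys.foldl (pvStepS rmk pin) s, keys.foldl (pvStepS rmk pin) s) := by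
  intro keys
  induction keys with
  | nil => intro s; rfl
  | cons c keys ih =>
      intro s
      simp only [List.foldl_cons, pvStepA, pvStepS, PySem.Set.contains, PySem.Set.add]
      cases hg : (!(List.contains s c) && !(rmk.contains c) && !(pin.contains c)) with
      | false => exact ih s
      | true =>
          have h1 := (Bool.and_eq_true_iff.mp hg).1
          have h2 := (Bool.and_eq_true_iff.mp h1).1
          have hc : List.contains s c = false := by
            cases hcc : List.contains s c with
            | false => rfl
            | true => rw [hcc] at h2; exact absurd h2 (by decide)
          rw [hc]
          exact ih (s ++ [c])

-- invariant sA = sB.filter p: A's collapsed loop equals the dedup loop followed by the filter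
lemma pvFusedEqDedupFilter (rmk pin : List String) (p : String → Bool)
    (hp : ∀ c, p c = (!(rmk.contains c) && !(pin.contains c))) :
    ∀ (keys : List String) (sB : List String),
    keys.foldl (pvStepS rmk pin) (sB.filter p)
      = (keys.foldl PySem.Set.add sB).filter p := by
  intro keys
  induction keys with
  | nil => intro sB; rfl
  | cons c keys ih =>
      intro sB
      simp only [List.foldl_cons, pvStepS, PySem.Set.add, PySem.Set.contains]
      cases hpc : p c with
      | true =>
          have hmem : (sB.filter p).contains c = sB.contains c := by simp [hpc]
          have hpb : (!(rmk.contains c) && !(pin.contains c)) = true := by rw [← hp]; exact hpc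
          rcases Bool.eq_false_or_eq_true (sB.contains c) with hc | hc
          · have hLg : (!(List.filter p sB).contains c && !(rmk.contains c) && !(pin.contains c)) = false := by
              rw [hmem, hc]; simp
            simp only [hc, hLg, Bool.false_eq_true, reduceIte]
            exact ih sB
          · have hLg : (!(List.filter p sB).contains c && !(rmk.contains c) && !(pin.contains c)) = true := by
              rw [hmem, hc, Bool.not_false, Bool.true_and]; exact hpb
            simp only [hc, hLg, reduceIte]
            have hfa : (sB.filter p) ++ [c] = (sB ++ [c]).filter p := by
              simp [List.filter_append, hpc]
            rw [hfa]
            exact ih (sB ++ [c])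
      | false =>
          have hpb : (!(rmk.contains c) && !(pin.contains c)) = false := by rw [← hp]; exact hpc
          have hLg : (!(List.filter p sB).contains c && !(rmk.contains c) && !(pin.contains c)) = false := by
            rcases Bool.and_eq_false_iff.mp hpb with h | h
            · rw [h]; simp
            · rw [h]; simp
          rw [hLg]
          rcases Bool.eq_false_or_eq_true (sB.contains c) with hc | hc
          · simp only [hc, Bool.false_eq_true, reduceIte]
            exact ih sB
          · simp only [hc, Bool.false_eq_true, reduceIte]
            have hfa : sB.filter p = (sB ++ [c]).filter p := by
              simp [List.filter_append, hpc]
            rw [hfa]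
            exact ih (sB ++ [c])

lemma pvDedupFoldl (keys : List String) :
    PySem.List.dedup keys = keys.foldl PySem.Set.add [] := by
  rw [PySem.List.dedup_eq_ofList, PySem.Set.ofList_eq_foldl]

-- so A's result is (dedup flat).filter p
lemma pvAEqDedupFilter (rmk pin : List String) (rows : List (List (String × String))) :
    get_center_col_ids_from_rows_py rows rmk pin
      = (PySem.List.dedup (rows.flatMap (fun row => row.map Prod.fst))).filter
          (fun c => !(rmk.contains c) && !(pin.contains c)) := by
  simp only [get_center_col_ids_from_rows_py]
  rw [pvFlattenA]
  have e0 : (([], PySem.Set.empty) : List String × PySem.Set String)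
      = (([], []) : List String × List String) := rfl
  rw [e0, pvPairEq]
  have h2 := pvFusedEqDedupFilter rmk pin
      (fun c => !(rmk.contains c) && !(pin.contains c)) (fun c => rfl)
      (rows.flatMap (fun row => row.map Prod.fst)) []
  simp only [List.filter_nil] at h2
  rw [pvDedupFoldl]
  exact h2

-- first-occurrence index used as B's sort key
def pvIdx (flat : List String) (c : String) : Nat := (PySem.List.index? flat c).getD 0

-- a member's first index is below the length
lemma pvIdxLt (flat : List String) (c : String) (hc : c ∈ flat) : pvIdx flat c < flat.length := by
  have hs : (PySem.List.index? flat c).isSome := (PySem.List.index?_isSome_iff flat c).mpr hc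
  rcases Option.isSome_iff_exists.mp hs with ⟨k, hk⟩
  rcases PySem.List.getElem_of_index?_eq_some hk with ⟨hlt, _, _⟩
  simp only [pvIdx, hk, Option.getD_some]
  exact hlt

-- dedup lists its elements in strictly increasing first-index order
lemma pvDedupPairwiseIdx : ∀ (flat : List String),
    (PySem.List.dedup flat).Pairwise (fun a b => pvIdx flat a < pvIdx flat b) := by
  intro flat
  induction flat using List.reverseRecOn with
  | nil => simp [PySem.List.dedup]
  | append_singleton l c ih =>
      have hded : PySem.List.dedup (l ++ [c]) = PySem.Set.add (PySem.List.dedup l) c := by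
        rw [pvDedupFoldl, pvDedupFoldl, List.foldl_append]
        rfl
      have hsub : ∀ a ∈ PySem.List.dedup l, a ∈ l := fun a ha => (PySem.List.mem_dedup l a).mp ha
      have hkeep : (PySem.List.dedup l).Pairwise (fun a b => pvIdx (l ++ [c]) a < pvIdx (l ++ [c]) b) := by
        refine List.Pairwise.imp_of_mem ?_ ih
        intro a b ha hb hab
        have ea : pvIdx (l ++ [c]) a = pvIdx l a := by
          simp only [pvIdx, PySem.List.index?_append_of_mem [c] (hsub a ha)]
        have eb : pvIdx (l ++ [c]) b = pvIdx l b := by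
          simp only [pvIdx, PySem.List.index?_append_of_mem [c] (hsub b hb)]
        rw [ea, eb]; exact hab
      rw [hded]
      by_cases hcl : c ∈ l
      · have : PySem.Set.add (PySem.List.dedup l) c = PySem.List.dedup l := by
          simp [PySem.Set.add, PySem.Set.contains, List.contains_eq_mem, hcl]
        rw [this]; exact hkeep
      · have : PySem.Set.add (PySem.List.dedup l) c = PySem.List.dedup l ++ [c] := by
          simp [PySem.Set.add, PySem.Set.contains, List.contains_eq_mem, hcl]
        rw [this, List.pairwise_append]
        refine ⟨hkeep, by simp, ?_⟩
        intro a ha b hb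
        have hb' : b = c := by simpa using hb
        rw [hb']
        have ec : pvIdx (l ++ [c]) c = l.length := by
          simp only [pvIdx, PySem.List.index?_append_singleton_self l c hcl, Option.getD_some]
        have ea : pvIdx (l ++ [c]) a = pvIdx l a := by
          simp only [pvIdx, PySem.List.index?_append_of_mem [c] (hsub a ha)]
        rw [ec, ea]
        exact pvIdxLt l a (hsub a ha)

-- the first-occurrence dict looks up the first index (shifted by the start offset s)
lemma pvFirstGet : ∀ (l : List String) (s : Int) (d : PySem.Dict String Int) (x : String),
    ((PySem.List.enumerate l s).reverse.foldl (fun d p => d.insert p.2 p.1) d).get? x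
      = match PySem.List.index? l x with
        | some k => some (s + (k : Int))
        | none => d.get? x := by
  intro l
  induction l with
  | nil =>
      intro s d x
      simp [PySem.List.enumerate_nil, PySem.List.index?]
  | cons y l ih =>
      intro s d x
      rw [PySem.List.enumerate_cons, List.reverse_cons, List.foldl_append]
      by_cases hyx : y = x
      · subst hyx
        simp only [List.foldl_cons, List.foldl_nil, PySem.Dict.get?_insert_self,
          PySem.List.index?_cons_self]
        simp
      · simp only [List.foldl_cons, List.foldl_nil]
        rw [PySem.Dict.get?_insert_of_ne _ s (fun h => hyx (Eq.symm h)), ih (s + 1) d x,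
          PySem.List.index?_cons_of_ne l hyx]
        cases hk : PySem.List.index? l x with
        | none => simp
        | some k =>
            simp only [Option.map_some, Option.some.injEq]
            push_cast
            ring

-- on elements of flat, B's sort key is the first-occurrence index
lemma pvKeyEq (flat : List String) (c : String) (hc : c ∈ flat) :
    ((pvFirst flat).get? c).getD 0 = ((pvIdx flat c : Nat) : Int) := by
  have hs : (PySem.List.index? flat c).isSome := (PySem.List.index?_isSome_iff flat c).mpr hc
  rcases Option.isSome_iff_exists.mp hs with ⟨k, hk⟩
  unfold pvFirst
  rw [pvFirstGet flat 0 PySem.Dict.empty c, hk]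
  have hpv : pvIdx flat c = k := by simp only [pvIdx, hk, Option.getD_some]
  rw [hpv]
  simp

-- ===== VERDICT (by name: the statement is the Claim_ definition above) =====
theorem get_center_col_ids_from_rows_py_spec : Claim_equal_get_center_col_ids_from_rows_py := by
  intro rows rmk pin _
  unfold Spec_get_center_col_ids_from_rows_py
  rw [pvAEqDedupFilter]
  simp only [get_center_col_ids_from_rows_py_alt, pvFlat]
  set flat := rows.flatMap (fun row => row.map Prod.fst) with hflat
  set p : String → Bool := fun c => !(rmk.contains c) && !(pin.contains c) with hpdef
  set ys := (PySem.List.dedup flat).filter p with hys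
  have hsubf : ∀ a ∈ ys, a ∈ flat := by
    intro a ha
    have := (List.mem_filter.mp (hys ▸ ha)).1
    exact (PySem.List.mem_dedup flat a).mp this
  have hpairys : ys.Pairwise (fun a b => ((pvFirst flat).get? a).getD 0 < ((pvFirst flat).get? b).getD 0) := by
    refine List.Pairwise.imp_of_mem ?_ (List.Pairwise.filter p (pvDedupPairwiseIdx flat))
    intro a b ha hb hab
    rw [pvKeyEq flat a (hsubf a ha), pvKeyEq flat b (hsubf b hb)]
    exact_mod_cast hab
  have hnys : ys.Nodup := (PySem.List.nodup_dedup flat).filter p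
  have hcenter : PySem.Set.ofList (flat.filter p) = PySem.List.dedup (flat.filter p) :=
    (PySem.List.dedup_eq_ofList (flat.filter p)).symm
  have hnc : (PySem.List.dedup (flat.filter p)).Nodup := PySem.List.nodup_dedup _
  have hperm : ys.Perm (PySem.List.dedup (flat.filter p)) := by
    rw [List.perm_ext_iff_of_nodup hnys hnc]
    intro a
    simp [hys, List.mem_filter, and_comm]
  have := PySem.List.sorted_eq_of_perm_of_pairwise_lt
      (xs := PySem.List.dedup (flat.filter p)) (key := fun c => ((pvFirst flat).get? c).getD 0)
      (ys := ys) hperm hpairys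
  rw [hcenter]
  exact this.symm
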